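-- pv_equiv track=rewrite | github.com/drothermel/dr_plotter | src/dr_plotter/utils.py | partition_kwargs
-- ===== SOURCE A (Python) =====
-- DR_PLOTTER_STYLE_KEYS = ['title', 'xlabel', 'ylabel', 'legend', 'display_values', 'xlabel_pos']
--
-- def partition_kwargs(kwargs):
--     """Partitions kwargs into dr_plotter specific and matplotlib specific."""
--     dr_plotter_kwargs = {}
--     matplotlib_kwargs = {}
--     for key, value in kwargs.items():
--         if key in DR_PLOTTER_STYLE_KEYS:
--             dr_plotter_kwargs[key] = value
--         else:
--             matplotlib_kwargs[key] = value
--     return dr_plotter_kwargs, matplotlib_kwargs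
-- ===== SOURCE B (Python) =====
-- DR_PLOTTER_STYLE_KEYS = ['title', 'xlabel', 'ylabel', 'legend', 'display_values', 'xlabel_pos']
--
-- def partition_kwargs(kwargs):
--     """Partitions kwargs into dr_plotter specific and matplotlib specific."""
--     def split(items):
--         # divide and conquer: split each half, then concatenate (order preserved)
--         if not items:
--             return [], []
--         if len(items) == 1:
--             k, v = items[0]
--             return ([(k, v)], []) if k in DR_PLOTTER_STYLE_KEYS else ([], [(k, v)])
--         mid = len(items) // 2
--         ld, lm = split(items[:mid])
--         rd, rm = split(items[mid:])
--         return ld + rd, lm + rm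
--     dr, mpl = split(list(kwargs.items()))
--     return dict(dr), dict(mpl)
-- ===== Notes on version B (the rewrite author's own statement) =====
-- stated objective: alternative
-- what changed: Replaces A's single imperative loop maintaining two dict accumulators with a divide-and-conquer recursion that splits the item list in halves, partitions each half into two pair lists, concatenates them, and only at the end materialises the two lists as dicts.
import Mathlib
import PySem

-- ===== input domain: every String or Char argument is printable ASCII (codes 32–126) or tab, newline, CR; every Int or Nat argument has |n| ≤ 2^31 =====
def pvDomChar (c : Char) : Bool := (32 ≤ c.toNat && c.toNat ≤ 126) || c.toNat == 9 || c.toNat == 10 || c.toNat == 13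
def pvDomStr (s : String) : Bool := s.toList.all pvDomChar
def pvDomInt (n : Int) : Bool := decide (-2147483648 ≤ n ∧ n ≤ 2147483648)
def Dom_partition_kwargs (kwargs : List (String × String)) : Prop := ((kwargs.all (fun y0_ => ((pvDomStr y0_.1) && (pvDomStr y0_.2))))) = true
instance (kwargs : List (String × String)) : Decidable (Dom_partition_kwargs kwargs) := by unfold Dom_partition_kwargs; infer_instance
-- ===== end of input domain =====

-- B replaces A's imperative loop over two dict accumulators with a divide-and-conquer
-- recursion splitting the item list in halves into two pair lists, concatenated and
-- turned into dicts at the end (alternative algorithm, same result).  Return value only; no mutation.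

-- ===== PORT A =====
def pvStyleKeys : List String :=
  ["title", "xlabel", "ylabel", "legend", "display_values", "xlabel_pos"]

def partition_kwargs (kwargs : List (String × String)) :
    (List (String × String)) × (List (String × String)) :=
  let r := kwargs.foldl
    (fun (acc : PySem.Dict String String × PySem.Dict String String) p =>
      if pvStyleKeys.contains p.1 then (acc.1.insert p.1 p.2, acc.2)
      else (acc.1, acc.2.insert p.1 p.2))
    (PySem.Dict.empty, PySem.Dict.empty)
  (r.1.items, r.2.items)

-- ===== PORT B =====
-- split(items): divide and conquer — partition each half, concatenate the results.
-- items[:mid] / items[mid:] with 0 ≤ mid ≤ len are exactly List.take mid / List.drop mid.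
def pvSplit : List (String × String) → List (String × String) × List (String × String)
  | [] => ([], [])
  | [(k, v)] => if pvStyleKeys.contains k then ([(k, v)], []) else ([], [(k, v)])
  | p :: q :: rest =>
    let items := p :: q :: rest
    let mid := items.length / 2
    let l := pvSplit (items.take mid)
    let r := pvSplit (items.drop mid)
    (l.1 ++ r.1, l.2 ++ r.2)
termination_by l => l.length
decreasing_by
  · simp [List.length_take]; omega
  · simp [List.length_drop]; omega

def partition_kwargs_alt (kwargs : List (String × String)) :
    (List (String × String)) × (List (String × String)) :=
  let r := pvSplit kwargs
  ((PySem.Dict.ofList r.1).items, (PySem.Dict.ofList r.2).items)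

-- ===== PRECONDITION & SPEC =====
def Spec_partition_kwargs (kwargs : List (String × String)) (out : (List (String × String)) × (List (String × String))) : Prop := out = partition_kwargs_alt kwargs
instance (kwargs : List (String × String)) (out : (List (String × String)) × (List (String × String))) : Decidable (Spec_partition_kwargs kwargs out) := by unfold Spec_partition_kwargs; infer_instance

-- ===== CLAIM (what is proved, stated in full; the proofs are below) =====
def Claim_equal_partition_kwargs : Prop := ∀ (kwargs : List (String × String)), Dom_partition_kwargs kwargs → Spec_partition_kwargs kwargs (partition_kwargs kwargs)

-- ===== LEMMAS AND PROOFS =====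

-- B's divide-and-conquer produces exactly the two filters of the input list.
lemma pvSplit_eq_filter (l : List (String × String)) :
    pvSplit l = (l.filter (fun p => pvStyleKeys.contains p.1),
                 l.filter (fun p => !pvStyleKeys.contains p.1)) := by
  induction l using pvSplit.induct with
  | case1 => simp [pvSplit]
  | case2 k v hk => simp only [List.contains_eq_mem, decide_eq_true_eq] at hk; simp [pvSplit, hk]
  | case3 k v hk => simp only [List.contains_eq_mem, decide_eq_true_eq] at hk; simp [pvSplit, hk]
  | case4 p q rest items mid ih1 ih2 =>
    rw [pvSplit, ih1, ih2]
    have h := List.take_append_drop ((p :: q :: rest).length / 2) (p :: q :: rest)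
    simp only [Prod.mk.injEq]
    refine ⟨?_, ?_⟩ <;> rw [← List.filter_append] <;> exact congrArg _ h

-- A's loop invariant: the interleaved fold over two dict accumulators equals
-- inserting each filtered sublist into its own dict.
lemma partition_foldl (l : List (String × String)) (d m : PySem.Dict String String) :
    (l.foldl
      (fun (acc : PySem.Dict String String × PySem.Dict String String) p =>
        if pvStyleKeys.contains p.1 then (acc.1.insert p.1 p.2, acc.2)
        else (acc.1, acc.2.insert p.1 p.2)) (d, m)) =
    ((l.filter (fun p => pvStyleKeys.contains p.1)).foldl (fun a p => a.insert p.1 p.2) d,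
     (l.filter (fun p => !pvStyleKeys.contains p.1)).foldl (fun a p => a.insert p.1 p.2) m) := by
  induction l generalizing d m with
  | nil => rfl
  | cons p rest ih =>
    by_cases hk : p.1 ∈ pvStyleKeys
    · have h := ih (d.insert p.1 p.2) m
      simpa [List.filter_cons, hk] using h
    · have h := ih d (m.insert p.1 p.2)
      simpa [List.filter_cons, hk] using h

-- ===== VERDICT (by name: the statement is the Claim_ definition above) =====
theorem partition_kwargs_spec : Claim_equal_partition_kwargs := by
  intro kwargs _
  unfold Spec_partition_kwargs partition_kwargs partition_kwargs_alt
  rw [partition_foldl kwargs PySem.Dict.empty PySem.Dict.empty, pvSplit_eq_filter]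
  rfl
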